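-- pv_equiv track=rewrite | github.com/gauravjoshi1292/FPL | algorithms/common.py | get_max_and_min
-- ===== SOURCE A (Python) =====
-- def get_max_and_min(player_stats):
--     """
--     Returns maximum and minimum values corresponding to all the statistics
--
--     :param player_stats: player statistics
--     :type player_stats: dict
--
--     :rtype: dict, dict
--     """
--     max_values = {}
--     min_values = {}
--     for player, stats in player_stats.items():
--         for key, val in stats.items():
--             if key == 'team':
--                 continue
--
--             try:
--                 if stats[key] > max_values[key] and stats['minutes']:
--                     max_values[key] = stats[key]
--             except KeyError:
--                 if stats['minutes']:
--                     max_values[key] = stats[key]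
--
--             try:
--                 if stats[key] < min_values[key] and stats['minutes']:
--                     min_values[key] = stats[key]
--             except KeyError:
--                 if stats['minutes']:
--                     min_values[key] = stats[key]
--
--     return max_values, min_values
-- ===== SOURCE B (Python) =====
-- def get_max_and_min(player_stats):
--     """
--     Returns maximum and minimum values corresponding to all the statistics
--
--     :param player_stats: player statistics
--     :type player_stats: dict
--
--     :rtype: dict, dict
--     """
--     values = {}
--     for player, stats in player_stats.items():
--         for key, val in stats.items():
--             if key == 'team':
--                 continue
--             if stats['minutes']:
--                 values.setdefault(key, []).append(val)
--     max_values = {k: max(v) for k, v in values.items()}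
--     min_values = {k: min(v) for k, v in values.items()}
--     return max_values, min_values
-- ===== Notes on version B (the rewrite author's own statement) =====
-- stated objective: alternative
-- what changed: B replaces A's running max/min maintenance (with its try/except KeyError-driven updates) by one grouping pass that collects every counted value into a per-key list and a second pass that takes max/min of each list.
import Mathlib
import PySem

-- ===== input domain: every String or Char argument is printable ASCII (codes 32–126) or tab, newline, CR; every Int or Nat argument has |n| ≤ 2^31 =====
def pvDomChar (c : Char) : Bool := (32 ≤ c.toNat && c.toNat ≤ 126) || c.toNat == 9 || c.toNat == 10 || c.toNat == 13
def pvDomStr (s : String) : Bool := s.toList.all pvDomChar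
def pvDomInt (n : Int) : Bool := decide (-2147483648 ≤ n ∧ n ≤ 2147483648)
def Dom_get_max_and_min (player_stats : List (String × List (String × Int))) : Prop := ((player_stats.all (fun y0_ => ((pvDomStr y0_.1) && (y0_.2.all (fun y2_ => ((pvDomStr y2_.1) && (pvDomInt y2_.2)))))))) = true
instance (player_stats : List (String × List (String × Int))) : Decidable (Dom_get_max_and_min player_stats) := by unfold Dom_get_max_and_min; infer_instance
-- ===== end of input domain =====

-- B replaces A's running max/min maintenance by a grouping pass (per-key value lists) followed by max/min of each list; same cost, different decomposition.


-- ===== PORT A =====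
-- one iteration of A's inner `for key, val in stats.items()` loop; the state is (max_values, min_values).
-- Where the Python raises KeyError ('minutes' missing while an update is attempted) the port reads the
-- default 0 instead; those inputs are excluded by Pre_ below.
def pvStepA (stats : PySem.Dict String Int)
    (acc : PySem.Dict String Int × PySem.Dict String Int) (kv : String × Int) :
    PySem.Dict String Int × PySem.Dict String Int :=
  if kv.1 == "team" then acc
  else
    let sval := stats.getD kv.1 0          -- stats[key]
    let minutes := stats.getD "minutes" 0  -- stats['minutes']
    let mv :=
      match acc.1.get? kv.1 with
      | some m => if sval > m ∧ minutes ≠ 0 then acc.1.insert kv.1 sval else acc.1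
      | none   => if minutes ≠ 0 then acc.1.insert kv.1 sval else acc.1
    let nv :=
      match acc.2.get? kv.1 with
      | some m => if sval < m ∧ minutes ≠ 0 then acc.2.insert kv.1 sval else acc.2
      | none   => if minutes ≠ 0 then acc.2.insert kv.1 sval else acc.2
    (mv, nv)

def get_max_and_min (player_stats : List (String × List (String × Int))) : (List (String × Int)) × (List (String × Int)) :=
  let d := PySem.Dict.ofList player_stats
  let r := d.items.foldl
    (fun acc pl =>
      let stats := PySem.Dict.ofList pl.2
      stats.items.foldl (pvStepA stats) acc)
    (PySem.Dict.empty, PySem.Dict.empty)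
  (r.1.items, r.2.items)

-- ===== PORT B =====
-- one iteration of B's inner loop: values.setdefault(key, []).append(val), guarded by stats['minutes']
def pvStepB (stats : PySem.Dict String Int)
    (vals : PySem.Dict String (List Int)) (kv : String × Int) : PySem.Dict String (List Int) :=
  if kv.1 == "team" then vals
  else if stats.getD "minutes" 0 ≠ 0 then vals.modify kv.1 [] (· ++ [kv.2]) else vals

def get_max_and_min_alt (player_stats : List (String × List (String × Int))) : (List (String × Int)) × (List (String × Int)) :=
  let d := PySem.Dict.ofList player_stats
  let values := d.items.foldl
    (fun vals pl =>
      let stats := PySem.Dict.ofList pl.2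
      stats.items.foldl (pvStepB stats) vals)
    PySem.Dict.empty
  (values.items.map (fun p => (p.1, (PySem.List.max? p.2 (fun x => x)).getD 0)),
   values.items.map (fun p => (p.1, (PySem.List.min? p.2 (fun x => x)).getD 0)))

-- ===== PRECONDITION & SPEC =====
-- Pre_ excludes inputs where some player's stats dict has a key other than 'team' but no 'minutes' key:
-- on such inputs Python A raises KeyError except in one accidental corner (every comparison false), where
-- A returns but B's natural grouping pass still raises KeyError.
def Pre_get_max_and_min (player_stats : List (String × List (String × Int))) : Prop :=
  ∀ p ∈ player_stats, (∃ q ∈ p.2, q.1 ≠ "team") → (∃ q ∈ p.2, q.1 = "minutes")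
instance (player_stats : List (String × List (String × Int))) : Decidable (Pre_get_max_and_min player_stats) := by unfold Pre_get_max_and_min; infer_instance

def pvWitness_get_max_and_min : (List (String × List (String × Int))) :=
  [("p1", [("minutes", 90), ("goals", 2)]), ("p2", [("minutes", 0), ("goals", 7)]), ("p3", [("team", 3)])]

def Spec_get_max_and_min (player_stats : List (String × List (String × Int))) (out : (List (String × Int)) × (List (String × Int))) : Prop := out = get_max_and_min_alt player_stats
instance (player_stats : List (String × List (String × Int))) (out : (List (String × Int)) × (List (String × Int))) : Decidable (Spec_get_max_and_min player_stats out) := by unfold Spec_get_max_and_min; infer_instance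

-- ===== CLAIM (what is proved, stated in full; the proofs are below) =====
def Claim_equal_get_max_and_min : Prop := ∀ (player_stats : List (String × List (String × Int))), Dom_get_max_and_min player_stats → Pre_get_max_and_min player_stats → Spec_get_max_and_min player_stats (get_max_and_min player_stats)

-- ===== LEMMAS AND PROOFS =====

-- max(l) / min(l) as B computes them
def pvMax (l : List Int) : Int := (PySem.List.max? l (fun x => x)).getD 0
def pvMin (l : List Int) : Int := (PySem.List.min? l (fun x => x)).getD 0

def pvMapVal (f : List Int → Int) (l : List (String × List Int)) : List (String × Int) :=
  l.map (fun p => (p.1, f p.2))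

-- the invariant tying B's table of value lists to A's pair of running-extrema dicts
def pvInv (vals : PySem.Dict String (List Int))
    (acc : PySem.Dict String Int × PySem.Dict String Int) : Prop :=
  acc.1 = PySem.Dict.mk (pvMapVal pvMax vals.items) ∧
  acc.2 = PySem.Dict.mk (pvMapVal pvMin vals.items) ∧
  (∀ p ∈ vals.items, p.2 ≠ []) ∧
  vals.keys.Nodup

theorem pvGet?_mapVal (f : List Int → Int) (l : List (String × List Int)) (k : String) :
    (PySem.Dict.mk (pvMapVal f l)).get? k = ((PySem.Dict.mk l).get? k).map f := by
  simp [PySem.Dict.get?, pvMapVal, List.find?_map, Function.comp_def, Option.map_map]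

theorem pvMax_append (l : List Int) (v : Int) (h : l ≠ []) :
    pvMax (l ++ [v]) = if v > pvMax l then v else pvMax l := by
  obtain ⟨x, t, rfl⟩ := List.exists_cons_of_ne_nil h
  unfold pvMax
  rw [List.cons_append, PySem.List.max?_id_cons, PySem.List.max?_id_cons, List.foldl_append]
  simp only [List.foldl_cons, List.foldl_nil, Option.getD_some]
  by_cases h1 : v > List.foldl max x t
  · rw [max_eq_right h1.le, if_pos h1]
  · rw [max_eq_left (not_lt.mp h1), if_neg h1]

theorem pvMin_append (l : List Int) (v : Int) (h : l ≠ []) :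
    pvMin (l ++ [v]) = if v < pvMin l then v else pvMin l := by
  obtain ⟨x, t, rfl⟩ := List.exists_cons_of_ne_nil h
  unfold pvMin
  rw [List.cons_append, PySem.List.min?_id_cons, PySem.List.min?_id_cons, List.foldl_append]
  simp only [List.foldl_cons, List.foldl_nil, Option.getD_some]
  by_cases h1 : v < List.foldl min x t
  · rw [min_eq_right h1.le, if_pos h1]
  · rw [min_eq_left (not_lt.mp h1), if_neg h1]

theorem pvMax_singleton (v : Int) : pvMax [v] = v := by
  simp [pvMax, PySem.List.max?_id_cons]

theorem pvMin_singleton (v : Int) : pvMin [v] = v := by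
  simp [pvMin, PySem.List.min?_id_cons]

-- one truthy-minutes update on either extremum dict, generically over max/min
theorem pvSideUpd (cmp : Int → Int → Prop) [DecidableRel cmp] (f : List Int → Int)
    (hf1 : ∀ v : Int, f [v] = v)
    (hf2 : ∀ (l : List Int) (v : Int), l ≠ [] → f (l ++ [v]) = if cmp v (f l) then v else f l)
    (vals : PySem.Dict String (List Int)) (k : String) (v : Int)
    (hne : ∀ p ∈ vals.items, p.2 ≠ []) (hnd : vals.keys.Nodup) :
    (match (PySem.Dict.mk (pvMapVal f vals.items)).get? k with
      | some m => if cmp v m then (PySem.Dict.mk (pvMapVal f vals.items)).insert k v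
                  else PySem.Dict.mk (pvMapVal f vals.items)
      | none => (PySem.Dict.mk (pvMapVal f vals.items)).insert k v)
    = PySem.Dict.mk (pvMapVal f (vals.modify k [] (· ++ [v])).items) := by
  rw [pvGet?_mapVal]
  cases hg : vals.get? k with
  | none =>
    have hc : vals.contains k = false := by
      rw [PySem.Dict.contains_eq_isSome_get?, hg]; rfl
    have hgD : vals.getD k [] = [] := by simp [PySem.Dict.getD, hg]
    have hc2 : (PySem.Dict.mk (pvMapVal f vals.items)).contains k = false := by
      rw [PySem.Dict.contains_eq_isSome_get?, pvGet?_mapVal, hg]; rfl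
    simp only [Option.map_none]
    rw [show vals.modify k [] (· ++ [v]) = vals.insert k (vals.getD k [] ++ [v]) from rfl, hgD,
      PySem.Dict.items_insert_of_not_contains _ _ hc]
    apply PySem.Dict.ext
    rw [PySem.Dict.items_insert_of_not_contains _ _ hc2]
    simp [pvMapVal, hf1]
  | some l0 =>
    have hmem : (k, l0) ∈ vals.items := PySem.Dict.mem_items_of_get?_eq_some vals hg
    have hl0 : l0 ≠ [] := hne _ hmem
    have hc : vals.contains k = true := by
      rw [PySem.Dict.contains_eq_isSome_get?, hg]; rfl
    have hgD : vals.getD k [] = l0 := by simp [PySem.Dict.getD, hg]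
    have hc2 : (PySem.Dict.mk (pvMapVal f vals.items)).contains k = true := by
      rw [PySem.Dict.contains_eq_isSome_get?, pvGet?_mapVal, hg]; rfl
    have huniq : ∀ p ∈ vals.items, p.1 = k → p.2 = l0 := by
      intro p hp hpk
      have h1 : vals.get? p.1 = some p.2 :=
        PySem.Dict.get?_of_mem_items vals (by simpa using hp) hnd
      rw [hpk, hg] at h1
      exact (Option.some_inj.mp h1).symm
    simp only [Option.map_some]
    rw [show vals.modify k [] (· ++ [v]) = vals.insert k (vals.getD k [] ++ [v]) from rfl, hgD,
      PySem.Dict.items_insert_of_contains _ _ hc]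
    by_cases hcmp : cmp v (f l0)
    · rw [if_pos hcmp]
      apply PySem.Dict.ext
      rw [PySem.Dict.items_insert_of_contains _ _ hc2]
      simp only [pvMapVal, List.map_map]
      apply List.map_congr_left
      intro p hp
      by_cases hk : p.1 = k
      · simp [hk, hf2 l0 v hl0, if_pos hcmp]
      · simp [hk]
    · rw [if_neg hcmp]
      apply congrArg
      simp only [pvMapVal, List.map_map]
      apply List.map_congr_left
      intro p hp
      by_cases hk : p.1 = k
      · simp [hk, huniq p hp hk, hf2 l0 v hl0, if_neg hcmp]
      · simp [hk]

theorem pvModify_ne (vals : PySem.Dict String (List Int)) (k : String) (v : Int)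
    (hne : ∀ p ∈ vals.items, p.2 ≠ []) :
    ∀ p ∈ (vals.modify k [] (· ++ [v])).items, p.2 ≠ [] := by
  intro p hp
  rw [show vals.modify k [] (· ++ [v]) = vals.insert k (vals.getD k [] ++ [v]) from rfl] at hp
  by_cases hc : vals.contains k
  · rw [PySem.Dict.items_insert_of_contains _ _ hc] at hp
    obtain ⟨q, hq, rfl⟩ := List.mem_map.mp hp
    by_cases hk : q.1 = k
    · simp [hk]
    · simpa [hk] using hne q hq
  · rw [PySem.Dict.items_insert_of_not_contains _ _ (Bool.of_not_eq_true hc)] at hp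
    rcases List.mem_append.mp hp with h | h
    · exact hne p h
    · simp [List.mem_singleton.mp h]

theorem pvModify_nodup (vals : PySem.Dict String (List Int)) (k : String) (v : Int)
    (hnd : vals.keys.Nodup) : (vals.modify k [] (· ++ [v])).keys.Nodup := by
  rw [show vals.modify k [] (· ++ [v]) = vals.insert k (vals.getD k [] ++ [v]) from rfl]
  exact PySem.Dict.nodup_keys_insert _ _ _ hnd

theorem pvStep_inv (stats : PySem.Dict String Int) (vals acc) (kv : String × Int)
    (hval : stats.getD kv.1 0 = kv.2) (h : pvInv vals acc) :
    pvInv (pvStepB stats vals kv) (pvStepA stats acc kv) := by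
  obtain ⟨h1, h2, hne, hnd⟩ := h
  by_cases hteam : kv.1 == "team"
  · simpa [pvStepA, pvStepB, hteam] using ⟨h1, h2, hne, hnd⟩
  · by_cases hm : stats.getD "minutes" 0 = 0
    · unfold pvStepA pvStepB
      cases hg1 : acc.1.get? kv.1 <;> cases hg2 : acc.2.get? kv.1 <;>
        simp_all [pvInv] <;> exact hne
    · have hB : (pvStepB stats vals kv) = vals.modify kv.1 [] (· ++ [kv.2]) := by
        simp [pvStepB, hteam, hm]
      rw [hB]
      refine ⟨?_, ?_, pvModify_ne vals kv.1 kv.2 hne, pvModify_nodup vals kv.1 kv.2 hnd⟩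
      · have hA : (pvStepA stats acc kv).1 =
            (match acc.1.get? kv.1 with
              | some m => if kv.2 > m then acc.1.insert kv.1 kv.2 else acc.1
              | none => acc.1.insert kv.1 kv.2) := by
          unfold pvStepA
          cases hg : acc.1.get? kv.1 <;> simp [hteam, hm, hval]
        rw [hA, h1]
        exact pvSideUpd (fun a b => a > b) pvMax pvMax_singleton pvMax_append vals kv.1 kv.2 hne hnd
      · have hA : (pvStepA stats acc kv).2 =
            (match acc.2.get? kv.1 with
              | some m => if kv.2 < m then acc.2.insert kv.1 kv.2 else acc.2
              | none => acc.2.insert kv.1 kv.2) := by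
          unfold pvStepA
          cases hg : acc.2.get? kv.1 <;> simp [hteam, hm, hval]
        rw [hA, h2]
        exact pvSideUpd (fun a b => a < b) pvMin pvMin_singleton pvMin_append vals kv.1 kv.2 hne hnd

theorem pvFold_inner (stats : PySem.Dict String Int) (l : List (String × Int)) (vals acc)
    (hvals : ∀ kv ∈ l, stats.getD kv.1 0 = kv.2) (h : pvInv vals acc) :
    pvInv (l.foldl (pvStepB stats) vals) (l.foldl (pvStepA stats) acc) := by
  induction l generalizing vals acc with
  | nil => exact h
  | cons kv t ih =>
      exact ih _ _ (fun x hx => hvals x (List.mem_cons_of_mem _ hx))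
        (pvStep_inv stats vals acc kv (hvals kv (List.mem_cons_self)) h)

theorem pvFold_outer (ps : List (String × List (String × Int))) (vals acc)
    (h : pvInv vals acc) :
    pvInv
      (ps.foldl (fun vals pl =>
        (PySem.Dict.ofList pl.2).items.foldl (pvStepB (PySem.Dict.ofList pl.2)) vals) vals)
      (ps.foldl (fun acc pl =>
        (PySem.Dict.ofList pl.2).items.foldl (pvStepA (PySem.Dict.ofList pl.2)) acc) acc) := by
  induction ps generalizing vals acc with
  | nil => exact h
  | cons pl t ih =>
      refine ih _ _ (pvFold_inner _ _ _ _ (fun kv hkv => ?_) h)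
      exact PySem.Dict.getD_of_mem_items _ (by simpa using hkv) (PySem.Dict.nodup_keys_ofList pl.2) 0

-- ===== VERDICT (by name: the statement is the Claim_ definition above) =====
theorem get_max_and_min_spec : Claim_equal_get_max_and_min := by
  intro ps _ _
  unfold Spec_get_max_and_min get_max_and_min get_max_and_min_alt
  have h := pvFold_outer (PySem.Dict.ofList ps).items PySem.Dict.empty (PySem.Dict.empty, PySem.Dict.empty)
    ⟨rfl, rfl, by simp [PySem.Dict.empty], by simp [PySem.Dict.empty]⟩
  obtain ⟨h1, h2, -, -⟩ := h
  simp only []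
  rw [h1, h2]
  rfl
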